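-- pv_equiv track=rewrite | github.com/Ma-urj/Mad-Libs | madlibretry.py | compphrase
-- ===== SOURCE A (Python) =====
-- def compphrase(phrase, order):
--     nphrase = ""
--     n = 0
--     for i in phrase:
--         if i == "_":
--             inp = order[n]
--             n+=1
--         else:
--             inp = i
--         nphrase = nphrase + inp
--     return nphrase
-- ===== SOURCE B (Python) =====
-- def compphrase(phrase, order):
--     segments = phrase.split("_")
--     parts = [segments[0]]
--     for i in range(len(segments) - 1):
--         parts.append(order[i])
--         parts.append(segments[i + 1])
--     return "".join(parts)
-- ===== Notes on version B (the rewrite author's own statement) =====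
-- stated objective: idiomatic
-- what changed: B splits the phrase on '_' once and joins the segments interleaved with the order words, instead of scanning character by character while concatenating onto a string.
import Mathlib
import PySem

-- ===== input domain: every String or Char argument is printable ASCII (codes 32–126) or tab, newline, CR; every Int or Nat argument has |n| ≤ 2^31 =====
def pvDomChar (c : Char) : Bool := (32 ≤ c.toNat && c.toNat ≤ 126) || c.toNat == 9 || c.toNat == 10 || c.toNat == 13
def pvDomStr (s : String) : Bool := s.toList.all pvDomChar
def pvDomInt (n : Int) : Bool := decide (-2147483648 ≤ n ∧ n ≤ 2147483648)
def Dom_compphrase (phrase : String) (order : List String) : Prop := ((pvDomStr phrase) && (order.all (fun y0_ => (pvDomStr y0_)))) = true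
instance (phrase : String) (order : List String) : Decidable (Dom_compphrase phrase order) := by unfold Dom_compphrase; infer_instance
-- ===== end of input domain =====

-- B replaces A's character-by-character scan with split-on-'_' and a join of segments
-- interleaved with the order words; equivalence is proved wherever A returns (Pre_).

-- ===== PORT A =====
-- literal transliteration of A's loop: state (nphrase, n), one step per character
def compphrase (phrase : String) (order : List String) : String :=
  String.ofList ((phrase.toList.foldl
    (fun (st : List Char × Nat) i =>
      if i = '_' then (st.1 ++ (PySem.List.pyGetD order (st.2 : Int) "").toList, st.2 + 1)
      else (st.1 ++ [i], st.2))
    ([], 0)).1)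

-- ===== PORT B =====
-- literal transliteration of Source B: split, accumulate parts over range(len(segments)-1), join
def compphrase_alt (phrase : String) (order : List String) : String :=
  let segments := (PySem.Str.split? phrase "_").getD []
  let parts := (PySem.List.pyRange 0 ((segments.length : Int) - 1)).foldl
      (fun ps i => ps ++ [PySem.List.pyGetD order i "", PySem.List.pyGetD segments (i + 1) ""])
      [PySem.List.pyGetD segments 0 ""]
  PySem.Str.join "" parts

-- ===== PRECONDITION & SPEC =====
-- Pre_ excludes exactly the inputs with more underscores than order words: there Python A
-- (and Python B alike) raises IndexError on order[n].
def Pre_compphrase (phrase : String) (order : List String) : Prop :=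
  phrase.toList.count '_' ≤ order.length
instance (phrase : String) (order : List String) : Decidable (Pre_compphrase phrase order) := by
  unfold Pre_compphrase; infer_instance

def pvWitness_compphrase : String × List String := ("a_b_c", ["mad", "lib"])

def Spec_compphrase (phrase : String) (order : List String) (out : String) : Prop := out = compphrase_alt phrase order
instance (phrase : String) (order : List String) (out : String) : Decidable (Spec_compphrase phrase order out) := by unfold Spec_compphrase; infer_instance

-- ===== CLAIM (what is proved, stated in full; the proofs are below) =====
def Claim_equal_compphrase : Prop := ∀ (phrase : String) (order : List String), Dom_compphrase phrase order → Pre_compphrase phrase order → Spec_compphrase phrase order (compphrase phrase order)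

-- ===== LEMMAS AND PROOFS =====

-- reference splitter: mySplit cs = cs split on '_'
def mySplit : List Char → List (List Char)
  | [] => [[]]
  | c :: cs => if c = '_' then [] :: mySplit cs else (mySplit cs).modifyHead (c :: ·)

theorem mySplit_ne_nil (cs : List Char) : mySplit cs ≠ [] := by
  cases cs with
  | nil => simp [mySplit]
  | cons c cs =>
    simp only [mySplit]
    split
    · simp
    · cases h : mySplit cs with
      | nil => exact absurd h (mySplit_ne_nil cs)
      | cons a t => simp

-- reference interleaver: segments joined with the order words starting at index n
def inter (order : List String) : List (List Char) → Nat → List Char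
  | [], _ => []
  | [s], _ => s
  | s :: t :: rest, n => s ++ (order.getD n "").toList ++ inter order (t :: rest) (n + 1)

theorem inter_cons_head (order : List String) (c : Char) (h : List Char)
    (t : List (List Char)) (n : Nat) :
    inter order ((c :: h) :: t) n = c :: inter order (h :: t) n := by
  cases t <;> simp [inter]

-- A's loop computes acc ++ inter order (mySplit cs) n
theorem foldlA_eq (order : List String) (cs : List Char) (acc : List Char) (n : Nat) :
    (cs.foldl
      (fun (st : List Char × Nat) i =>
        if i = '_' then (st.1 ++ (PySem.List.pyGetD order (st.2 : Int) "").toList, st.2 + 1)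
        else (st.1 ++ [i], st.2))
      (acc, n)).1 = acc ++ inter order (mySplit cs) n := by
  induction cs generalizing acc n with
  | nil => simp [mySplit, inter]
  | cons c cs ih =>
    rw [List.foldl_cons]
    by_cases hc : c = '_'
    · subst hc
      rw [if_pos rfl, ih]
      cases h : mySplit cs with
      | nil => exact absurd h (mySplit_ne_nil cs)
      | cons t rest => simp [mySplit, h, inter]
    · rw [if_neg hc, ih]
      cases h : mySplit cs with
      | nil => exact absurd h (mySplit_ne_nil cs)
      | cons t rest => simp [mySplit, hc, h, inter_cons_head]

-- PySem's splitOn with sep "_" is mySplit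
theorem splitOn_go_eq (fuel : Nat) (l cur : List Char) (acc : List (List Char))
    (hf : l.length ≤ fuel) :
    PySem.Chars.splitOn.go ['_'] fuel l cur acc
      = acc.reverse ++ (mySplit l).modifyHead (cur.reverse ++ ·) := by
  induction l generalizing fuel cur acc with
  | nil =>
    cases fuel <;> simp [PySem.Chars.splitOn.go, mySplit]
  | cons c cs ih =>
    cases fuel with
    | zero => simp at hf
    | succ fuel =>
      by_cases hc : c = '_'
      · subst hc
        rw [PySem.Chars.splitOn.go, if_pos (by simp)]
        simp only [List.length_cons, List.length_nil, List.drop_succ_cons, List.drop_zero]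
        rw [ih fuel [] (cur.reverse :: acc) (by simpa using Nat.le_of_succ_le_succ hf)]
        cases h : mySplit cs with
        | nil => exact absurd h (mySplit_ne_nil cs)
        | cons t rest => simp [mySplit, h]
      · rw [PySem.Chars.splitOn.go, if_neg (by simp [Ne.symm hc])]
        rw [ih fuel (c :: cur) acc (by simpa using Nat.le_of_succ_le_succ hf)]
        cases h : mySplit cs with
        | nil => exact absurd h (mySplit_ne_nil cs)
        | cons t rest => simp [mySplit, if_neg hc, h]

theorem splitOn_eq (cs : List Char) : PySem.Chars.splitOn cs ['_'] = mySplit cs := by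
  rw [PySem.Chars.splitOn, splitOn_go_eq (cs.length + 1) cs [] [] (by omega)]
  cases h : mySplit cs with
  | nil => exact absurd h (mySplit_ne_nil cs)
  | cons t rest => simp

-- inter as a flatten over indices
theorem inter_flatten (order : List String) (t : List (List Char)) (s : List Char) (n : Nat) :
    inter order (s :: t) n
      = s ++ ((List.range t.length).map
          (fun k => (order.getD (n + k) "").toList ++ t.getD k [])).flatten := by
  induction t generalizing s n with
  | nil => simp [inter]
  | cons u rest ih =>
    simp only [inter, List.length_cons, List.range_succ_eq_map, List.map_cons,
      List.flatten_cons, List.map_map, ih, List.append_assoc, Nat.add_zero,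
      List.getD_cons_zero]
    apply congrArg
    apply congrArg
    apply congrArg
    apply congrArg List.flatten
    apply List.map_congr_left
    intro k _
    simp only [Function.comp_apply, List.getD_cons_succ]
    have hnk : n + 1 + k = n + (k + 1) := by omega
    rw [hnk]

theorem intercalate_nil_flatten (L : List (List Char)) :
    List.intercalate [] L = L.flatten := by
  induction L with
  | nil => simp [List.intercalate]
  | cons a L ih =>
    cases L with
    | nil => simp [List.intercalate]
    | cons b L => simp_all [List.intercalate]

theorem aux_flat (u v : Nat → String) (l : List Nat) :
    (List.map String.toList (l.flatMap (fun k => [u k, v k]))).flatten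
      = (l.map (fun k => (u k).toList ++ (v k).toList)).flatten := by
  induction l with
  | nil => simp
  | cons a l ih => simp [List.flatMap_cons, ih]

-- ===== VERDICT (by name: the statement is the Claim_ definition above) =====
theorem compphrase_spec : Claim_equal_compphrase := by
  intro phrase order _hd _hp
  unfold Spec_compphrase compphrase compphrase_alt
  apply String.toList_inj.mp
  rw [foldlA_eq order phrase.toList [] 0]
  have hsplit : (PySem.Str.split? phrase "_").getD []
      = (mySplit phrase.toList).map String.ofList := by
    simp [PySem.Str.split?, PySem.Chars.split?, splitOn_eq]
  simp only [hsplit]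
  cases hS : mySplit phrase.toList with
  | nil => exact absurd hS (mySplit_ne_nil phrase.toList)
  | cons s t =>
    rw [inter_flatten]
    simp only [List.map_cons, List.length_cons, List.length_map]
    have harith : ((t.length + 1 : Nat) : Int) - 1 = ((t.length : Nat) : Int) := by
      push_cast; ring
    rw [harith, PySem.List.pyRange_zero_natCast,
      PySem.List.foldl_append_eq_flatMap
        (fun i => [PySem.List.pyGetD order i "",
          PySem.List.pyGetD (String.ofList s :: t.map String.ofList) (i + 1) ""])]
    rw [List.flatMap_map]
    simp only [PySem.Str.toList_join, PySem.Chars.join, String.toList_empty,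
      intercalate_nil_flatten, List.map_append, List.map_cons, List.map_nil,
      List.flatten_append, List.flatten_cons, List.flatten_nil, List.append_nil,
      String.toList_ofList, PySem.List.pyGetD_zero_cons]
    rw [aux_flat]
    simp only [List.nil_append]
    apply congrArg
    apply congrArg List.flatten
    apply List.map_congr_left
    intro k hk
    rw [List.mem_range] at hk
    have h1 : ((k : Int) + 1) = ((k + 1 : Nat) : Int) := by push_cast; ring
    simp only [h1, PySem.List.pyGetD_natCast, Nat.zero_add, List.getD_cons_succ]
    congr 1
    simp [List.getD_eq_getElem?_getD, List.getElem?_map,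
      List.getElem?_eq_getElem (by omega : k < t.length), String.toList_ofList]
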